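-- pv_equiv track=rewrite | github.com/appaegis/api-script-samples | device-tag-update.py | sanitize_csv_rows
-- ===== SOURCE A (Python) =====
-- def _normalize_mac(mac):
--     """
--     Normalize MAC to lowercase colon-separated format when possible.
--     Example: AA-BB-CC-DD-EE-FF -> aa:bb:cc:dd:ee:ff
--     """
--     raw = (mac or '').strip().lower()
--     hex_only = ''.join(ch for ch in raw if ch in '0123456789abcdef')
--     if len(hex_only) == 12:
--         return ':'.join(hex_only[i:i + 2] for i in range(0, 12, 2))
--     return raw
--
-- def sanitize_csv_rows(rows):
--     """
--     De-duplicate CSV rows by normalized MAC (first one wins).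
--     Returns (sanitized_rows, duplicate_csv_macs).
--     """
--     seen = set()
--     sanitized = []
--     duplicate_csv_macs = []
--     for r in rows:
--         mac = _normalize_mac(r.get('mac'))
--         if not mac:
--             continue
--         if mac in seen:
--             duplicate_csv_macs.append(mac)
--             continue
--         seen.add(mac)
--         sanitized.append({'mac': mac, 'tag': r.get('tag', '')})
--     return sanitized, sorted(set(duplicate_csv_macs))
-- ===== SOURCE B (Python) =====
-- def _normalize_mac(mac):
--     raw = (mac or '').strip().lower()
--     hex_only = ''.join(ch for ch in raw if ch in '0123456789abcdef')
--     if len(hex_only) == 12: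
--         return ':'.join(hex_only[i:i + 2] for i in range(0, 12, 2))
--     return raw
--
-- def sanitize_csv_rows(rows):
--     # Pass 0: normalize once, keeping (mac, tag) for every row with a truthy mac.
--     pairs = []
--     for r in rows:
--         mac = _normalize_mac(r.get('mac'))
--         if mac:
--             pairs.append((mac, r.get('tag', '')))
--     # Pass 1: count occurrences of each mac.
--     counts = {}
--     for mac, _tag in pairs:
--         counts[mac] = counts.get(mac, 0) + 1
--     # Pass 2: first occurrence wins.
--     first = {}
--     for mac, tag in pairs:
--         first.setdefault(mac, tag)
--     sanitized = [{'mac': mac, 'tag': tag} for mac, tag in first.items()]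
--     duplicate_csv_macs = sorted(m for m, c in counts.items() if c > 1)
--     return sanitized, duplicate_csv_macs
-- ===== Notes on version B (the rewrite author's own statement) =====
-- stated objective: alternative
-- what changed: A's single fused loop (seen-set + sanitized list + duplicate list maintained together) is replaced by a normalize-and-filter pass producing (mac, tag) pairs, then two independent passes over those pairs: a count dict whose >1 entries become the sorted duplicate list, and a first-wins dict whose items become the sanitized rows.
import Mathlib
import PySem

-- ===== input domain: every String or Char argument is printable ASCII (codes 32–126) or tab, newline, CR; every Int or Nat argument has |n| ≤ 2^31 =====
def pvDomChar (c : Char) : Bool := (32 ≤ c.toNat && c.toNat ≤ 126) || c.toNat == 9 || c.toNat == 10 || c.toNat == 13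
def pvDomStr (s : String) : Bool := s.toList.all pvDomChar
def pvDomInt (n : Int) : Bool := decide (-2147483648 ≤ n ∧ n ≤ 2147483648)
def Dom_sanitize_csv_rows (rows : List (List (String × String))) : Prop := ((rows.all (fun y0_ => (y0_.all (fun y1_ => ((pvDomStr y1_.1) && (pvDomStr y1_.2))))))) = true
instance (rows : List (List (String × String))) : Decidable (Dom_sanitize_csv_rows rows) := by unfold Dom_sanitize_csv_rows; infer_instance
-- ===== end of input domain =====

-- B replaces A's single fused dedup loop by a normalize-once pass followed by two separate passes
-- (a count dict and a first-wins dict) over the normalized pairs; objective: alternative decomposition.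

-- ===== PORT A =====
-- shared helper _normalize_mac (identical in Source A and Source B).
-- 'ch in "0123456789abcdef"' on a single char is ported as list membership (exact for 1-char needles);
-- ''.join over the kept chars is the filtered char list.
def normalize_mac (mac : Option String) : String :=
  let raw := PySem.Str.lower (PySem.Str.strip (mac.getD ""))
  let hexOnly := raw.toList.filter (fun ch => ("0123456789abcdef".toList).contains ch)
  if hexOnly.length = 12 then
    String.ofList (PySem.Chars.join [':']
      ((PySem.List.pyRange 0 12 2).map (fun i => PySem.List.slice hexOnly (some i) (some (i + 2)))))
  else raw

def sanitize_csv_rows (rows : List (List (String × String))) : (List (List (String × String))) × List String :=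
  let st := rows.foldl
    (fun (st : PySem.Set String × List (List (String × String)) × List String) r =>
      let mac := normalize_mac (List.lookup "mac" r)
      if mac = "" then st
      else if PySem.Set.contains st.1 mac then (st.1, st.2.1, st.2.2 ++ [mac])
      else (PySem.Set.add st.1 mac,
            st.2.1 ++ [[("mac", mac), ("tag", (List.lookup "tag" r).getD "")]],
            st.2.2))
    (PySem.Set.empty, [], [])
  (st.2.1, PySem.List.sorted (PySem.Set.ofList st.2.2) (fun x => x) false)

-- ===== PORT B =====
def sanitize_csv_rows_alt (rows : List (List (String × String))) : (List (List (String × String))) × List String :=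
  let pairs := rows.filterMap (fun r =>
    let mac := normalize_mac (List.lookup "mac" r)
    if mac = "" then none else some (mac, (List.lookup "tag" r).getD ""))
  let counts := pairs.foldl
    (fun (d : PySem.Dict String Int) p => d.insert p.1 (d.getD p.1 0 + 1)) PySem.Dict.empty
  let first := pairs.foldl
    (fun (d : PySem.Dict String String) p => if d.contains p.1 then d else d.insert p.1 p.2) PySem.Dict.empty
  (first.items.map (fun p => [("mac", p.1), ("tag", p.2)]),
   PySem.List.sorted (counts.items.filterMap (fun p => if 1 < p.2 then some p.1 else none)) (fun x => x) false)

-- ===== PRECONDITION & SPEC =====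
def Spec_sanitize_csv_rows (rows : List (List (String × String))) (out : (List (List (String × String))) × List String) : Prop := out = sanitize_csv_rows_alt rows
instance (rows : List (List (String × String))) (out : (List (List (String × String))) × List String) : Decidable (Spec_sanitize_csv_rows rows out) := by unfold Spec_sanitize_csv_rows; infer_instance

-- ===== CLAIM (what is proved, stated in full; the proofs are below) =====
def Claim_equal_sanitize_csv_rows : Prop := ∀ (rows : List (List (String × String))), Dom_sanitize_csv_rows rows → Spec_sanitize_csv_rows rows (sanitize_csv_rows rows)

-- ===== LEMMAS AND PROOFS =====

-- the filter-and-normalize step both programs apply to a row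
def pvF (r : List (String × String)) : Option (String × String) :=
  if normalize_mac (List.lookup "mac" r) = "" then none
  else some (normalize_mac (List.lookup "mac" r), (List.lookup "tag" r).getD "")

-- the normalized (mac, tag) pairs both programs effectively traverse
def pvPairs (rows : List (List (String × String))) : List (String × String) :=
  rows.filterMap pvF

-- A's loop body on a raw row (definitionally the lambda inside sanitize_csv_rows)
def pvStepA (st : PySem.Set String × List (List (String × String)) × List String)
    (r : List (String × String)) :
    PySem.Set String × List (List (String × String)) × List String :=
  let mac := normalize_mac (List.lookup "mac" r)
  if mac = "" then st
  else if PySem.Set.contains st.1 mac then (st.1, st.2.1, st.2.2 ++ [mac])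
  else (PySem.Set.add st.1 mac,
        st.2.1 ++ [[("mac", mac), ("tag", (List.lookup "tag" r).getD "")]],
        st.2.2)

-- A's loop body on a normalized pair
def pvFA (st : PySem.Set String × List (List (String × String)) × List String) (p : String × String) :
    PySem.Set String × List (List (String × String)) × List String :=
  if PySem.Set.contains st.1 p.1 then (st.1, st.2.1, st.2.2 ++ [p.1])
  else (PySem.Set.add st.1 p.1, st.2.1 ++ [[("mac", p.1), ("tag", p.2)]], st.2.2)

-- B's first-wins dict step
def pvFD (d : PySem.Dict String String) (p : String × String) : PySem.Dict String String :=
  if d.contains p.1 then d else d.insert p.1 p.2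

def pvRow (p : String × String) : List (String × String) := [("mac", p.1), ("tag", p.2)]

-- the duplicates A appends, given the macs already seen
def pvDups (seen : List String) : List String → List String
  | [] => []
  | m :: ms => if seen.contains m then m :: pvDups seen ms else pvDups (seen ++ [m]) ms

-- A's loop over the rows is its loop body over the normalized pairs
theorem foldA_eq (rows : List (List (String × String)))
    (st : PySem.Set String × List (List (String × String)) × List String) :
    rows.foldl pvStepA st = (pvPairs rows).foldl pvFA st := by
  induction rows generalizing st with
  | nil => rfl
  | cons r rows ih =>
    rw [List.foldl_cons, pvPairs, List.filterMap_cons]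
    by_cases h : normalize_mac (List.lookup "mac" r) = ""
    · rw [show pvF r = none by rw [pvF, if_pos h],
          show pvStepA st r = st by unfold pvStepA; rw [if_pos h]]
      exact ih st
    · have h1 : pvF r = some (normalize_mac (List.lookup "mac" r), (List.lookup "tag" r).getD "") := by
        rw [pvF, if_neg h]
      have h2 : pvStepA st r
          = pvFA st (normalize_mac (List.lookup "mac" r), (List.lookup "tag" r).getD "") := by
        unfold pvStepA pvFA
        rw [if_neg h]
      rw [h1, h2, List.foldl_cons]
      exact ih _

-- invariant tying A's (seen, sanitized) to B's first-wins dict, and A's duplicate list to pvDups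
set_option maxHeartbeats 1000000 in
theorem loopA (ps : List (String × String)) (d : PySem.Dict String String) (dups : List String) :
    ps.foldl pvFA (d.keys, d.items.map pvRow, dups)
      = ((ps.foldl pvFD d).keys, (ps.foldl pvFD d).items.map pvRow,
         dups ++ pvDups d.keys (ps.map Prod.fst)) := by
  induction ps generalizing d dups with
  | nil => simp [pvDups]
  | cons p ps ih =>
    by_cases h : p.1 ∈ d.keys
    · have h1 : PySem.Set.contains d.keys p.1 = true := by simp [PySem.Set.contains, h]
      have h2 : d.contains p.1 = true := by simp [pysem, h]
      have h3 : d.keys.contains p.1 = true := by simp [h]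
      simp only [List.foldl_cons, List.map_cons, pvFA, pvFD, pvDups, h1, h2, h3, if_true]
      rw [ih d (dups ++ [p.1])]
      simp
    · have h1 : PySem.Set.contains d.keys p.1 = false := by simp [PySem.Set.contains, h]
      have h2 : d.contains p.1 = false := by simp [pysem, h]
      have h3 : d.keys.contains p.1 = false := by simp [h]
      have hadd : PySem.Set.add d.keys p.1 = d.keys ++ [p.1] := by simp [PySem.Set.add, h]
      have hkeys : (d.insert p.1 p.2).keys = d.keys ++ [p.1] := by simp [pysem, h2]
      have hitems : (d.insert p.1 p.2).items = d.items ++ [(p.1, p.2)] := by simp [pysem, h2]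
      simp only [List.foldl_cons, List.map_cons, pvFA, pvFD, pvDups, h1, h2, h3, if_false,
        Bool.false_eq_true, hadd]
      rw [show (d.items.map pvRow ++ [[("mac", p.1), ("tag", p.2)]])
            = (d.insert p.1 p.2).items.map pvRow by simp [hitems, pvRow]]
      rw [← hkeys, ih (d.insert p.1 p.2) dups, hkeys]

-- x is among A's collected duplicates iff it was pre-seen and occurs, or occurs at least twice
theorem mem_pvDups (x : String) (seen ms : List String) :
    x ∈ pvDups seen ms ↔ (x ∈ seen ∧ 1 ≤ ms.count x) ∨ 2 ≤ ms.count x := by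
  induction ms generalizing seen with
  | nil => simp [pvDups]
  | cons m ms ih =>
    by_cases hs : m ∈ seen
    · have hb : seen.contains m = true := by simp [hs]
      simp only [pvDups, hb, if_true]
      rw [List.mem_cons, ih]
      by_cases hx : x = m
      · subst hx
        simp [hs, List.count_cons_self]
      · have hx' : ¬ m = x := fun h' => hx h'.symm
        have hcc : List.count x (m :: ms) = List.count x ms := by simp [hx']
        rw [hcc]
        simp [hx]
    · have hb : seen.contains m = false := by simp [hs]
      simp only [pvDups, hb, Bool.false_eq_true, if_false]
      rw [ih]
      by_cases hx : x = m
      · subst hx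
        constructor
        · rintro (⟨_, h2⟩ | h2) <;> exact Or.inr (by rw [List.count_cons_self]; omega)
        · rintro (⟨h1, _⟩ | h2)
          · exact absurd h1 hs
          · rw [List.count_cons_self] at h2
            by_cases hc : 1 ≤ List.count x ms
            · exact Or.inl ⟨by simp, hc⟩
            · exact Or.inr (by omega)
      · have hx' : ¬ m = x := fun h' => hx h'.symm
        have hcc : List.count x (m :: ms) = List.count x ms := by simp [hx']
        rw [hcc]
        simp [hx]

theorem filterMap_guard {α : Type} (l : List α) (p : α → Bool) :
    l.filterMap (fun k => if p k then some k else none) = l.filter p := by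
  induction l with
  | nil => rfl
  | cons a l ih => by_cases h : p a <;> simp [h, ih]

-- B's hand-rolled count dict is Counter over the macs
theorem counts_eq (ps : List (String × String)) :
    ps.foldl (fun (d : PySem.Dict String Int) p => d.insert p.1 (d.getD p.1 0 + 1)) PySem.Dict.empty
      = PySem.Dict.counter (ps.map Prod.fst) := by
  rw [PySem.Dict.counter_eq_foldl, List.foldl_map]
  have hstep : (fun (d : PySem.Dict String Int) (p : String × String) => d.insert p.1 (d.getD p.1 0 + 1))
      = fun d p => d.modify p.1 0 (· + 1) := by
    funext d p
    apply PySem.Dict.ext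
    simp [pysem, PySem.Dict.modify, PySem.Dict.insert, PySem.Dict.getD]
  rw [hstep]

-- ===== VERDICT (by name: the statement is the Claim_ definition above) =====
set_option maxHeartbeats 1000000 in
theorem sanitize_csv_rows_spec : Claim_equal_sanitize_csv_rows := by
  intro rows _
  show sanitize_csv_rows rows = sanitize_csv_rows_alt rows
  have e0 : sanitize_csv_rows rows
      = (let st := rows.foldl pvStepA (PySem.Set.empty, [], []);
         (st.2.1, PySem.List.sorted (PySem.Set.ofList st.2.2) (fun x => x) false)) := rfl
  have eB : sanitize_csv_rows_alt rows
      = (((pvPairs rows).foldl pvFD PySem.Dict.empty).items.map pvRow,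
         PySem.List.sorted
           (((pvPairs rows).foldl
              (fun (d : PySem.Dict String Int) p => d.insert p.1 (d.getD p.1 0 + 1))
              PySem.Dict.empty).items.filterMap (fun p => if 1 < p.2 then some p.1 else none))
           (fun x => x) false) := rfl
  rw [e0, eB]
  have hinit : ((PySem.Set.empty : PySem.Set String),
      ([] : List (List (String × String))), ([] : List String))
      = ((PySem.Dict.empty : PySem.Dict String String).keys,
         (PySem.Dict.empty : PySem.Dict String String).items.map pvRow, ([] : List String)) := rfl
  rw [foldA_eq, hinit, loopA]
  refine Prod.ext rfl ?_
  show PySem.List.sorted (PySem.Set.ofList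
      ([] ++ pvDups (PySem.Dict.empty : PySem.Dict String String).keys
        ((pvPairs rows).map Prod.fst))) (fun x => x) false = _
  rw [counts_eq, PySem.Dict.items_counter, List.filterMap_map]
  have hg : ((fun (p : String × Int) => if 1 < p.2 then some p.1 else none) ∘
      (fun k => (k, (((pvPairs rows).map Prod.fst).count k : Int))))
      = fun k => if (decide (1 < (((pvPairs rows).map Prod.fst).count k : Int))) then some k else none := by
    funext k; simp
  rw [hg, filterMap_guard]
  apply PySem.List.sorted_eq_sorted_of_perm _ _ _ (fun a b h => h)
  apply (List.perm_ext_iff_of_nodup (PySem.Set.nodup_ofList _)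
    ((PySem.Set.nodup_ofList ((pvPairs rows).map Prod.fst)).filter _)).2
  intro x
  rw [show (PySem.Dict.empty : PySem.Dict String String).keys = ([] : List String) from rfl]
  simp only [List.nil_append, PySem.Set.mem_ofList, mem_pvDups, List.not_mem_nil, false_and,
    false_or, List.mem_filter, decide_eq_true_eq]
  constructor
  · intro h
    have hx : x ∈ (pvPairs rows).map Prod.fst := List.count_pos_iff.1 (by omega)
    refine ⟨hx, ?_⟩
    have h1 : 1 < ((pvPairs rows).map Prod.fst).count x := by omega
    exact_mod_cast h1
  · rintro ⟨_, h⟩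
    have h2 : 1 < ((pvPairs rows).map Prod.fst).count x := by exact_mod_cast h
    omega
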